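-- pv_equiv track=rewrite | github.com/Hi-hyang/desktop-widget-quota | bin/quota_cli.py | get_latest_collect_time
-- ===== SOURCE A (Python) =====
-- def get_latest_collect_time(rows):
--     values = []
--     for row in rows:
--         value = str(row.get("collect_time", "") or "").strip()
--         if value:
--             values.append(value)
--     if not values:
--         return None
--     return max(values)
-- ===== SOURCE B (Python) =====
-- def get_latest_collect_time(rows):
--     cleaned = [str(row.get("collect_time", "") or "").strip() for row in rows]
--     values = sorted((v for v in cleaned if v), reverse=True)
--     return values[0] if values else None
-- ===== Notes on version B (the rewrite author's own statement) =====
-- stated objective: alternative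
-- what changed: Replaces collect-then-max with staged passes: map rows to cleaned strings, filter out empties, sort the survivors descending and return the head (the lexicographic maximum).
import Mathlib
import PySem

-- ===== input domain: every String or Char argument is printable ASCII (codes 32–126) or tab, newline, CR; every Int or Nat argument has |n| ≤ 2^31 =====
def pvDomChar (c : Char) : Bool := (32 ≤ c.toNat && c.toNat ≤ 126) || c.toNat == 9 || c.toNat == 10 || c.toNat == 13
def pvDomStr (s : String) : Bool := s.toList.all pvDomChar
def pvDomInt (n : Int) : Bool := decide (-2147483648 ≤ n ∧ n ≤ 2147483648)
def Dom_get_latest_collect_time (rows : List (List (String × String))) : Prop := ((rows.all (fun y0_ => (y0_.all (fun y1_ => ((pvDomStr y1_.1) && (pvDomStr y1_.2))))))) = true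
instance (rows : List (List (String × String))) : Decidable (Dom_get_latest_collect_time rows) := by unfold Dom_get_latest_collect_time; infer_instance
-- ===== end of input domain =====

-- B replaces A's accumulate-then-max loop with staged passes: map to cleaned strings, filter empties, sort descending, take the head (objective: alternative).

-- ===== PORT A =====
-- values = []; for row: value = str(row.get("collect_time","") or "").strip(); if value: values.append(value)
-- if not values: return None; return max(values)
def get_latest_collect_time (rows : List (List (String × String))) : Option String :=
  let values := rows.foldl (fun acc row =>
    let raw := (List.lookup "collect_time" row).getD ""    -- row.get("collect_time", "")
    let value := PySem.Str.strip (if raw = "" then "" else raw)  -- str(… or "").strip()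
    if value ≠ "" then acc ++ [value] else acc) []
  if values = [] then none
  else PySem.List.max? values (fun x => x)

-- ===== PORT B =====
-- cleaned = [str(row.get("collect_time","") or "").strip() for row in rows]
-- values = sorted((v for v in cleaned if v), reverse=True)
-- return values[0] if values else None
def get_latest_collect_time_alt (rows : List (List (String × String))) : Option String :=
  let cleaned := rows.map (fun row =>
    let raw := (List.lookup "collect_time" row).getD ""
    PySem.Str.strip (if raw = "" then "" else raw))
  let values := PySem.List.sorted (cleaned.filter (fun v => v ≠ "")) (fun x => x) true
  match values with
  | [] => none
  | m :: _ => some m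

-- ===== PRECONDITION & SPEC =====
def Spec_get_latest_collect_time (rows : List (List (String × String))) (out : Option String) : Prop := out = get_latest_collect_time_alt rows
instance (rows : List (List (String × String))) (out : Option String) : Decidable (Spec_get_latest_collect_time rows out) := by unfold Spec_get_latest_collect_time; infer_instance

-- ===== CLAIM (what is proved, stated in full; the proofs are below) =====
def Claim_equal_get_latest_collect_time : Prop := ∀ (rows : List (List (String × String))), Dom_get_latest_collect_time rows → Spec_get_latest_collect_time rows (get_latest_collect_time rows)

-- ===== LEMMAS AND PROOFS =====

-- the shared per-row cleaning expression
def pvClean (row : List (String × String)) : String :=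
  let raw := (List.lookup "collect_time" row).getD ""
  PySem.Str.strip (if raw = "" then "" else raw)

-- A's appended list is the cleaned values with empties filtered out
lemma a_values (rows : List (List (String × String))) :
    rows.foldl (fun acc row =>
        let raw := (List.lookup "collect_time" row).getD ""
        let value := PySem.Str.strip (if raw = "" then "" else raw)
        if value ≠ "" then acc ++ [value] else acc) ([] : List String)
      = ((rows.map pvClean).filter (fun v => decide (v ≠ ""))) := by
  have h := PySem.List.foldl_append_ite (l := rows) (acc := ([] : List String))
    (p := fun row => pvClean row ≠ "") (f := pvClean)
  simp only [List.nil_append] at h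
  rw [show (fun (acc : List String) (row : List (String × String)) =>
        let raw := (List.lookup "collect_time" row).getD ""
        let value := PySem.Str.strip (if raw = "" then "" else raw)
        if value ≠ "" then acc ++ [value] else acc)
      = (fun acc row => if pvClean row ≠ "" then acc ++ [pvClean row] else acc) from rfl]
  rw [h, List.filter_map]
  rfl

-- the head of the descending sort is Python's max(vs), for nonempty vs
lemma max_eq_sorted_head (vs : List String) :
    (if vs = [] then none else PySem.List.max? vs (fun x => x))
      = (match PySem.List.sorted vs (fun x => x) true with
         | [] => none
         | m :: _ => some m) := by
  cases hv : vs with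
  | nil => rfl
  | cons x t =>
    cases hs : PySem.List.sorted (x :: t) (fun y => y) true with
    | nil =>
      exact absurd ((PySem.List.sorted_eq_nil_iff _ _ _).mp hs) (by simp)
    | cons m r =>
      have hmax : PySem.List.max? (x :: t) (fun y => y) = some (t.foldl max x) :=
        PySem.List.max?_id_cons x t
      have hmem : t.foldl max x ∈ (x :: t) := PySem.List.max?_mem hmax
      have hisMax : ∀ y ∈ (x :: t), y ≤ t.foldl max x := PySem.List.max?_isMax hmax
      have hmge : ∀ y ∈ (x :: t), y ≤ m :=
        PySem.List.key_head_sorted_rev_ge (x :: t) (fun y => y) hs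
      have hmmem : m ∈ (x :: t) := by
        have : m ∈ PySem.List.sorted (x :: t) (fun y => y) true := by
          rw [hs]; exact List.mem_cons_self
        exact (PySem.List.mem_sorted _ _ _ _).mp this
      have hm : m = t.foldl max x := le_antisymm (hisMax _ hmmem) (hmge _ hmem)
      simp only [reduceCtorEq, if_false, hmax, hm]

-- ===== VERDICT (by name: the statement is the Claim_ definition above) =====
theorem get_latest_collect_time_spec : Claim_equal_get_latest_collect_time := by
  intro rows _
  unfold Spec_get_latest_collect_time get_latest_collect_time get_latest_collect_time_alt
  rw [a_values]
  exact max_eq_sorted_head ((rows.map pvClean).filter (fun v => decide (v ≠ "")))
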